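-- pv_equiv track=rewrite | github.com/tcandzq/LeetCode | Math/DivideTwoIntegers.py | divide2
-- ===== SOURCE A (Python) =====
-- def divide2(dividend: int, divisor: int) -> int:
--     sign = (dividend > 0) ^ (divisor > 0)
--     dividend = abs(dividend)
--     divisor = abs(divisor)
--     count = 0
--     # 把除数不断左移，直到它大于被除数
--     while dividend >= divisor:
--         count += 1
--         divisor <<= 1
--     result = 0
--     while count > 0:
--         count -= 1
--         divisor >>= 1
--         if divisor <= dividend:
--             result += 1 << count  # 翻倍的加
--             dividend -= divisor  # 翻倍的减
--     if sign: result = -result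
--     return result if -(1 << 31) <= result <= (1 << 31) - 1 else (1 << 31) - 1
-- ===== SOURCE B (Python) =====
-- def _udiv(a, b):
--     # recursive halving division: quotient of a by b for a >= 0, b > 0
--     if a < b:
--         return 0
--     q2 = _udiv(a, b << 1)
--     r = a - ((b * q2) << 1)
--     return (q2 << 1) + (1 if r >= b else 0)
--
-- def divide2(dividend: int, divisor: int) -> int:
--     sign = (dividend > 0) ^ (divisor > 0)
--     q = _udiv(abs(dividend), abs(divisor))
--     if sign:
--         q = -q
--     return q if -(1 << 31) <= q <= (1 << 31) - 1 else (1 << 31) - 1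
-- ===== Notes on version B (the rewrite author's own statement) =====
-- stated objective: alternative
-- what changed: Replaced A's two iterative loops (shift the divisor up counting steps, then a descending pass subtracting halved divisors) with a single recursive halving division: recurse on the doubled divisor, then derive this bit of the quotient from the remainder; sign and 32-bit clamp unchanged.
import Mathlib
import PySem

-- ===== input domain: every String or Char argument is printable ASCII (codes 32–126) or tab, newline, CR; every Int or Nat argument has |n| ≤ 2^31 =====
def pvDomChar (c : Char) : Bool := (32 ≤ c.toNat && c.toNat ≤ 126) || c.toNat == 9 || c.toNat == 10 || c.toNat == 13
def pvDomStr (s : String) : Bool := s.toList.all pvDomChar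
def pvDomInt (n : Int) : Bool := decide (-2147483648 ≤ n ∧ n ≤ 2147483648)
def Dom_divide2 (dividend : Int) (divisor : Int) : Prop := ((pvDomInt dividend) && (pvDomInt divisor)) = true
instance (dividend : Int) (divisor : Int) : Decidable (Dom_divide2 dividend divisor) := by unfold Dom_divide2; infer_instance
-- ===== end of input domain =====

-- B replaces A's two iterative quotient loops with one recursive halving division (same cost class); return value only.
-- ===== PORT A =====
-- first while loop: `while dividend >= divisor: count += 1; divisor <<= 1`; returns (count, final divisor).
-- The fuel argument only makes the recursion total: with divisor ≤ 0 the Python loop never terminates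
-- (excluded by Pre_); for 0 < divisor the fuel passed below never runs out.
def divide2_count : Nat → Int → Int → Nat × Int
  | 0, _, divisor => (0, divisor)
  | fuel + 1, dividend, divisor =>
    if divisor ≤ dividend then
      let r := divide2_count fuel dividend (2 * divisor)
      (r.1 + 1, r.2)
    else (0, divisor)

-- second while loop, structural recursion on count: `count -= 1; divisor >>= 1; if divisor <= dividend: …`
def divide2_loop2 : Nat → Int → Int → Int → Int
  | 0, _, _, result => result
  | count + 1, divisor, dividend, result =>
    let d' := divisor >>> (1 : Nat)
    if d' ≤ dividend then
      divide2_loop2 count d' (dividend - d') (result + 2 ^ count)  -- result += 1 << count; dividend -= divisor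
    else
      divide2_loop2 count d' dividend result

def divide2 (dividend : Int) (divisor : Int) : Int :=
  let sign := (decide (0 < dividend)) != (decide (0 < divisor))
  let a := |dividend|
  let b := |divisor|
  let cd := divide2_count (a + 1 - b).toNat a b
  let r0 := divide2_loop2 cd.1 cd.2 a 0
  let result := if sign then -r0 else r0
  if -(2 ^ 31) ≤ result ∧ result ≤ 2 ^ 31 - 1 then result else 2 ^ 31 - 1

-- ===== PORT B =====
-- `_udiv`: recursive halving division. The fuel is a totality guard only (in Python the recursion
-- bottoms out because b doubles past a whenever b > 0; b = 0 is excluded by Pre_).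
def divide2_udiv : Nat → Int → Int → Int
  | 0, _, _ => 0
  | fuel + 1, a, b =>
    if a < b then 0
    else
      let q2 := divide2_udiv fuel a (2 * b)
      let r := a - 2 * (b * q2)
      2 * q2 + (if b ≤ r then 1 else 0)

def divide2_alt (dividend : Int) (divisor : Int) : Int :=
  let sign := (decide (0 < dividend)) != (decide (0 < divisor))
  let q0 := divide2_udiv (|dividend| + 1 - |divisor|).toNat |dividend| |divisor|
  let q := if sign then -q0 else q0
  if -(2 ^ 31) ≤ q ∧ q ≤ 2 ^ 31 - 1 then q else 2 ^ 31 - 1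

-- ===== PRECONDITION & SPEC =====
-- Pre_ excludes only divisor = 0, on which Python A loops forever (divisor <<= 1 keeps it 0); B recurses without bound there.
def Pre_divide2 (dividend : Int) (divisor : Int) : Prop := divisor ≠ 0
instance (dividend : Int) (divisor : Int) : Decidable (Pre_divide2 dividend divisor) := by unfold Pre_divide2; infer_instance
def pvWitness_divide2 : Int × Int := (7, -2)

def Spec_divide2 (dividend : Int) (divisor : Int) (out : Int) : Prop := out = divide2_alt dividend divisor
instance (dividend : Int) (divisor : Int) (out : Int) : Decidable (Spec_divide2 dividend divisor out) := by unfold Spec_divide2; infer_instance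

-- ===== CLAIM (what is proved, stated in full; the proofs are below) =====
def Claim_equal_divide2 : Prop := ∀ (dividend : Int) (divisor : Int), Dom_divide2 dividend divisor → Pre_divide2 dividend divisor → Spec_divide2 dividend divisor (divide2 dividend divisor)

-- ===== LEMMAS AND PROOFS =====

-- A's first loop: with enough fuel the final divisor is the starting one shifted `count` times, and it exceeds the dividend.
theorem divide2_count_spec (fuel : Nat) (a d : Int) (hd : 0 < d) (hf : (a + 1 - d).toNat ≤ fuel) :
    (divide2_count fuel a d).2 = d * 2 ^ (divide2_count fuel a d).1 ∧ a < (divide2_count fuel a d).2 := by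
  induction fuel generalizing d with
  | zero =>
    have hlt : a < d := by omega
    exact ⟨by simp [divide2_count], by simpa [divide2_count] using hlt⟩
  | succ fuel ih =>
    rw [divide2_count]
    split
    · rename_i h
      have ihd := ih (2 * d) (by omega) (by omega)
      simp only
      exact ⟨by rw [ihd.1]; ring, ihd.2⟩
    · rename_i h
      exact ⟨by simp, by omega⟩

-- A's second loop is binary long division: starting from divisor d·2^c with dividend < d·2^c it adds ⌊dividend/d⌋.
theorem divide2_loop2_spec (c : Nat) (d a r : Int) (hd : 0 < d) (ha : 0 ≤ a) (hlt : a < d * 2 ^ c) :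
    divide2_loop2 c (d * 2 ^ c) a r = r + a / d := by
  induction c generalizing a r with
  | zero =>
    simp only [pow_zero, mul_one] at hlt
    rw [divide2_loop2, Int.ediv_eq_zero_of_lt ha hlt, add_zero]
  | succ c ih =>
    have hsh : (d * 2 ^ (c + 1)) >>> (1 : Nat) = d * 2 ^ c := by
      have e : d * 2 ^ (c + 1) = (d * 2 ^ c) * 2 := by ring
      rw [e, Int.shiftRight_eq_div_pow, pow_one]; push_cast; exact Int.mul_ediv_cancel _ (by norm_num)
    rw [divide2_loop2, hsh]
    split
    · rename_i hle
      rw [ih (a - d * 2 ^ c) (r + 2 ^ c) (by omega) (by have e2 : d * 2 ^ (c + 1) = 2 * (d * 2 ^ c) := (by ring); omega)]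
      have : a = (a - d * 2 ^ c) + 2 ^ c * d := by ring
      rw [show r + 2 ^ c + (a - d * 2 ^ c) / d = r + ((a - d * 2 ^ c) / d + 2 ^ c) by ring,
          ← Int.add_mul_ediv_right (a - d * 2 ^ c) (2 ^ c) (by omega), ← this]
    · rename_i hle
      exact ih a r ha (by omega)

-- B's recursion computes the true quotient.
theorem divide2_udiv_spec (fuel : Nat) (a b : Int) (hb : 0 < b) (ha : 0 ≤ a)
    (hf : (a + 1 - b).toNat ≤ fuel) :
    divide2_udiv fuel a b = a / b := by
  induction fuel generalizing b with
  | zero =>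
    have hlt : a < b := by omega
    rw [divide2_udiv, Int.ediv_eq_zero_of_lt ha hlt]
  | succ fuel ih =>
    rw [divide2_udiv]
    split
    · rename_i h
      exact (Int.ediv_eq_zero_of_lt ha h).symm
    · rename_i h
      simp only
      rw [ih (2 * b) (by omega) (by omega)]
      -- write q := a / (2b) and r := a % (2b); then a / b = 2q + r / b with r / b ∈ {0, 1}
      set q := a / (2 * b) with hqdef
      have hq : a % (2 * b) = a - 2 * b * q := by rw [Int.emod_def]
      have hr0 : 0 ≤ a % (2 * b) := Int.emod_nonneg a (by omega)
      have hr1 : a % (2 * b) < 2 * b := Int.emod_lt_of_pos a (by omega)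
      set r := a % (2 * b) with hrdef
      have hrw : a - 2 * (b * q) = r := by rw [hq]; ring
      rw [hrw]
      have hsplit : a / b = 2 * q + r / b := by
        rw [show a = r + (2 * q) * b by rw [hq]; ring, Int.add_mul_ediv_right r (2 * q) (by omega)]
        ring
      rw [hsplit]
      congr 1
      split
      · rename_i hle
        have h0 : (r - b) / b = 0 := Int.ediv_eq_zero_of_lt (by omega) (by omega)
        have hr2 : r / b = 1 := by
          rw [show r = (r - b) + 1 * b by ring, Int.add_mul_ediv_right _ _ (by omega : b ≠ 0)]
          omega
        rw [hr2]
      · rename_i hlt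
        exact (Int.ediv_eq_zero_of_lt hr0 (by omega)).symm

-- Both quotient computations equal |dividend| / |divisor|, so the sign/clamp wrappers agree.
theorem divide2_common (dividend divisor : Int) (h : divisor ≠ 0) :
    divide2 dividend divisor = divide2_alt dividend divisor := by
  simp only [divide2, divide2_alt]
  have hb : 0 < |divisor| := by positivity
  have ha : 0 ≤ |dividend| := abs_nonneg _
  obtain ⟨h1, h2⟩ := divide2_count_spec (|dividend| + 1 - |divisor|).toNat |dividend| |divisor| hb (le_refl _)
  rw [divide2_udiv_spec _ _ _ hb ha (le_refl _)]
  have := divide2_loop2_spec (divide2_count (|dividend| + 1 - |divisor|).toNat |dividend| |divisor|).1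
    |divisor| |dividend| 0 hb ha (by rw [← h1]; exact h2)
  rw [← h1] at this
  rw [this, zero_add]

-- ===== VERDICT (by name: the statement is the Claim_ definition above) =====
theorem divide2_spec : Claim_equal_divide2 := by
  intro dividend divisor _ hpre
  unfold Spec_divide2
  exact divide2_common dividend divisor hpre
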